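-- pv_equiv track=rewrite | github.com/DeepakBadarinath/Value_Interpretable_Dynamic_Treatment_Regimes | tests_parallelized/disjoint_box_union_parallel.py | generate_k_tuples
-- ===== SOURCE A (Python) =====
-- import itertools
-- import itertools
-- import itertools
--
-- def generate_k_tuples(array_list, k):
--     '''
--     Given a list of lists, return all possible k-tuples from the list of lists,
--     and also return the indices.
--
--     Parameters:
--     -----------------------------------------------------------------------
--     lists : list[list]
--             The list of lists we wish to sample from
--
--     k : int
--         The number of elements we want to look at in the tuples
--
--     Returns:
--     -----------------------------------------------------------------------
--     results : tuple
--               The tuple which denotes the values and the indices we wish to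
--               sample from
--
--     '''
--     # Step 3: Generate all possible combinations of indices of size k
--     index_combinations = list(itertools.combinations(range(len(array_list)), k))
--
--     # Step 4: Generate all possible k-tuples for each combination
--     all_k_tuples = []
--     for indices in index_combinations:
--         # Extract the sub-arrays corresponding to the current combination of indices
--         sub_arrays = []
--         for i in indices:
--             cart_arr = itertools.product(array_list[i], repeat = 2)
--             unequal_tuples = [tup for tup in cart_arr if tup[0]<tup[1]]
--             sub_arrays.append(unequal_tuples)
--
--         # Generate all possible k-tuples from the sub-arrays
--         k_tuples = list(itertools.product(*sub_arrays))
--         # Store the results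
--         all_k_tuples.append((indices, k_tuples))
--
--
--     return all_k_tuples
-- ===== SOURCE B (Python) =====
-- def generate_k_tuples(array_list, k):
--     # Increasing ordered pairs of each array, computed once up front.
--     pairs = [[(x, y) for x in a for y in a if x < y] for a in array_list]
--     n = len(array_list)
--
--     # One recursion builds the combinations of indices and their products
--     # together: no itertools at all.  rec(i, j) returns, for every
--     # j-combination of indices drawn from {i, ..., n-1} in lexicographic
--     # order, the pair (index tuple, all j-tuples of pairs for those indices).
--     def rec(i, j):
--         if j == 0:
--             return [((), [()])]
--         if i == n:
--             return []
--         with_i = [((i,) + idx, [(p,) + t for p in pairs[i] for t in tups])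
--                   for idx, tups in rec(i + 1, j - 1)]
--         return with_i + rec(i + 1, j)
--
--     return rec(0, k)
-- ===== Notes on version B (the rewrite author's own statement) =====
-- stated objective: alternative
-- what changed: B drops itertools entirely: one recursion over the index range builds each k-combination of indices and the Cartesian product of their increasing-pair lists simultaneously (choose-index-i branch prepends i and one pair to every recursive result, skip branch recurses), where A stages itertools.combinations, per-combination pair rebuilding, and itertools.product.
import Mathlib
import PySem

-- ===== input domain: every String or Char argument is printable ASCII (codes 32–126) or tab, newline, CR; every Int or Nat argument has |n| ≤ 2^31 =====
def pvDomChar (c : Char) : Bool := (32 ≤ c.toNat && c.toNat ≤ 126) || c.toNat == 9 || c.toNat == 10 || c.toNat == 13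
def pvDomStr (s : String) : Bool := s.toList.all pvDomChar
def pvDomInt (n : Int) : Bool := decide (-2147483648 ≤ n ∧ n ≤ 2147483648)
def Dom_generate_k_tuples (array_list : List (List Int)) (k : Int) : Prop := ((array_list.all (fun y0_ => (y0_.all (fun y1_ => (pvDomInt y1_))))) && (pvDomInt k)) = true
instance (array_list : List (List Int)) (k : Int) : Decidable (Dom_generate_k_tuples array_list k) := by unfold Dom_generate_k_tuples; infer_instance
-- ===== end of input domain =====

-- B replaces A's itertools.combinations + per-combination pair rebuild + itertools.product pipeline
-- by one recursion over the index range that builds each index combination and its product together.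

-- ===== PORT A =====
-- itertools.combinations(xs, r) in lexicographic order
def pyCombinations {α : Type} : List α → Nat → List (List α)
  | [], 0 => [[]]
  | [], _ + 1 => []
  | _ :: _, 0 => [[]]
  | x :: xs, r + 1 => ((pyCombinations xs r).map (x :: ·)) ++ pyCombinations xs (r + 1)

-- itertools.product(*pools) (variadic form, rightmost pool varies fastest)
def pyProductV : List (List (Int × Int)) → List (List (Int × Int))
  | [] => [[]]
  | pool :: rest => pool.flatMap (fun x => (pyProductV rest).map (fun t => x :: t))

-- loop body of A: build sub_arrays (product-then-filter per index), take their product, append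
def aStep (array_list : List (List Int)) (all_k_tuples : List (List Int × List (List (Int × Int)))) (indices : List Int) :
    List (List Int × List (List (Int × Int))) :=
  let sub_arrays := indices.foldl
    (fun sa i => sa ++ [((PySem.List.pyGetD array_list i []).flatMap
        (fun x => (PySem.List.pyGetD array_list i []).map (fun y => (x, y)))).filter
        (fun tup => tup.1 < tup.2)]) []
  all_k_tuples ++ [(indices, pyProductV sub_arrays)]

def generate_k_tuples (array_list : List (List Int)) (k : Int) : List (List Int × (List (List (Int × Int)))) :=
  (pyCombinations ((List.range array_list.length).map (fun i => (i : Int))) k.toNat).foldl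
    (aStep array_list) []

-- ===== PORT B =====
-- [(x, y) for x in a for y in a if x < y]
def pairsOf (arr : List Int) : List (Int × Int) :=
  arr.flatMap (fun x => (arr.filter (fun y => x < y)).map (fun y => (x, y)))

-- rec(i, j): build the j-combinations drawn from the suffix of pair lists (index i onward)
-- together with their products; `pairs` is that suffix, so the `i == n` test is `pairs = []`.
def bRec (pairs : List (List (Int × Int))) (i : Int) (j : Int) : List (List Int × List (List (Int × Int))) :=
  if j = 0 then [([], [[]])]
  else
    match pairs with
    | [] => []
    | p :: rest =>
        ((bRec rest (i + 1) (j - 1)).map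
          (fun r => (i :: r.1, p.flatMap (fun pr => r.2.map (fun t => pr :: t)))))
        ++ bRec rest (i + 1) j

def generate_k_tuples_alt (array_list : List (List Int)) (k : Int) : List (List Int × (List (List (Int × Int)))) :=
  bRec (array_list.map pairsOf) 0 k

-- ===== PRECONDITION & SPEC =====
-- A raises ValueError on k < 0 (itertools.combinations refuses a negative r); Pre_ excludes exactly those inputs.
def Pre_generate_k_tuples (array_list : List (List Int)) (k : Int) : Prop := 0 ≤ k
instance (array_list : List (List Int)) (k : Int) : Decidable (Pre_generate_k_tuples array_list k) := by unfold Pre_generate_k_tuples; infer_instance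
def pvWitness_generate_k_tuples : List (List Int) × Int := ([[1, 2], [3, 1]], 1)

def Spec_generate_k_tuples (array_list : List (List Int)) (k : Int) (out : List (List Int × (List (List (Int × Int))))) : Prop := out = generate_k_tuples_alt array_list k
instance (array_list : List (List Int)) (k : Int) (out : List (List Int × (List (List (Int × Int))))) : Decidable (Spec_generate_k_tuples array_list k out) := by unfold Spec_generate_k_tuples; infer_instance

-- ===== CLAIM (what is proved, stated in full; the proofs are below) =====
def Claim_equal_generate_k_tuples : Prop := ∀ (array_list : List (List Int)) (k : Int), Dom_generate_k_tuples array_list k → Pre_generate_k_tuples array_list k → Spec_generate_k_tuples array_list k (generate_k_tuples array_list k)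

-- ===== LEMMAS AND PROOFS =====

-- the pair list both programs compute for index i
def pairsAt (array_list : List (List Int)) (i : Int) : List (Int × Int) :=
  pairsOf (PySem.List.pyGetD array_list i [])

-- the common value of both programs for one index combination
def common (array_list : List (List Int)) (idxs : List Int) : List Int × List (List (Int × Int)) :=
  (idxs, pyProductV (idxs.map (pairsAt array_list)))

-- the indices [m, m+1, ..., m+len-1] as Ints
def idxFrom (m len : Nat) : List Int := (List.range' m len).map (fun t => (t : Int))

lemma pyCombinations_zero {α : Type} (l : List α) : pyCombinations l 0 = [[]] := by
  cases l <;> rfl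

lemma bRec_zero (pairs : List (List (Int × Int))) (i : Int) : bRec pairs i 0 = [([], [[]])] := by
  rw [bRec.eq_def]; simp

lemma bRec_nil (i j : Int) (hj : j ≠ 0) : bRec [] i j = [] := by
  rw [bRec.eq_def]; simp [hj]

lemma bRec_cons (p : List (Int × Int)) (rest : List (List (Int × Int))) (i j : Int) (hj : j ≠ 0) :
    bRec (p :: rest) i j
      = ((bRec rest (i + 1) (j - 1)).map
          (fun r => (i :: r.1, p.flatMap (fun pr => r.2.map (fun t => pr :: t)))))
        ++ bRec rest (i + 1) j := by
  rw [bRec.eq_def]; simp [hj]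

-- A's product-then-filter pairs equal B's comprehension pairs
lemma pairs_eq (arr : List Int) :
    (arr.flatMap (fun x => arr.map (fun y => (x, y)))).filter (fun tup => tup.1 < tup.2)
      = pairsOf arr := by
  simp [pairsOf, List.filter_flatMap, List.filter_map, Function.comp_def]

-- A's loop body appends exactly (indices, product of the pair lists)
lemma aStep_eq (al : List (List Int)) (acc : List (List Int × List (List (Int × Int)))) (idxs : List Int) :
    aStep al acc idxs = acc ++ [common al idxs] := by
  have hm := List.map_congr_left (l := idxs) (fun i _ => pairs_eq (PySem.List.pyGetD al i []))
  simp only [aStep]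
  rw [PySem.List.foldl_append_singleton_eq_map, List.nil_append, hm]
  rfl

-- A's result, in closed form
lemma a_eq (al : List (List Int)) (k : Int) :
    generate_k_tuples al k = (pyCombinations (idxFrom 0 al.length) k.toNat).map (common al) := by
  unfold generate_k_tuples
  have h1 : aStep al = fun acc idxs => acc ++ [common al idxs] := by
    funext acc idxs; exact aStep_eq al acc idxs
  have h2 : (List.range al.length).map (fun i => (i : Int)) = idxFrom 0 al.length := by
    rw [List.range_eq_range']; rfl
  rw [h1, h2, PySem.List.foldl_append_singleton_eq_map, List.nil_append]

-- B's recursion on the suffix of pair lists, in the same closed form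
lemma bRec_eq (al : List (List Int)) :
    ∀ (s : List (List Int)) (m j : Nat), s = al.drop m →
    bRec (s.map pairsOf) (m : Int) (j : Int)
      = (pyCombinations (idxFrom m s.length) j).map (common al) := by
  intro s
  induction s with
  | nil =>
    intro m j _
    cases j with
    | zero => simp [bRec_zero, pyCombinations_zero, common, pyProductV, idxFrom]
    | succ j' =>
      rw [List.map_nil, bRec_nil _ _ (by omega)]
      rfl
  | cons arr rest ih =>
    intro m j h
    have h0 : al[m]? = some arr := by rw [← List.head?_drop, ← h]; rfl
    have hget : pairsAt al (m : Int) = pairsOf arr := by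
      simp [pairsAt, PySem.List.pyGetD_natCast, List.getD, h0]
    have hrest : rest = al.drop (m + 1) := by
      rw [← List.tail_drop, ← h]; rfl
    cases j with
    | zero => simp [bRec_zero, pyCombinations_zero, common, pyProductV]
    | succ j' =>
      have hsub : (((j' + 1 : Nat)) : Int) - 1 = ((j' : Nat) : Int) := by omega
      have hm1 : ((m : Nat) : Int) + 1 = (((m + 1 : Nat)) : Int) := by omega
      rw [List.map_cons, bRec_cons _ _ _ _ (by omega), hsub, hm1,
        ih (m + 1) j' hrest, ih (m + 1) (j' + 1) hrest,
        show idxFrom m (arr :: rest).length = ((m : Nat) : Int) :: idxFrom (m + 1) rest.length from by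
          rw [idxFrom, List.length_cons, List.range'_succ]; rfl]
      simp only [pyCombinations, List.map_append, List.map_map]
      congr 1
      apply List.map_congr_left
      intro c _
      simp [common, pyProductV, hget]

-- ===== VERDICT (by name: the statement is the Claim_ definition above) =====
theorem generate_k_tuples_spec : Claim_equal_generate_k_tuples := by
  intro al k _ hk
  unfold Spec_generate_k_tuples generate_k_tuples_alt
  rw [a_eq]
  have := bRec_eq al al 0 k.toNat (by simp)
  rw [show ((k.toNat : Nat) : Int) = k from Int.toNat_of_nonneg hk] at this
  rw [← this]
  rfl
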